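-- pv_equiv track=rewrite | github.com/benquick123/code-profiling | code/batch-2/dn7 - minolovec/M-17200-0213.py | preberi_pot
-- ===== SOURCE A (Python) =====
-- def preberi_pot(ukazi):
--     """
--     Za podani seznam ukazov (glej navodila naloge) vrni pot.
--
--     Args:
--         ukazi (str): ukazi, napisani po vrsticah
--
--     Returns:
--         list of tuple of int: pot
--     """
--     smer = 0
--     poz_X, poz_Y = (0, 0)
--     premiki = [(0, 0), ]
--     for i in ukazi.split():
--         if i == "DESNO":
--             smer += 90
--         elif i == "LEVO":
--             smer -= 90
--         elif i.isnumeric():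
--             if smer % 360 == 90:
--                 poz_X, poz_Y = (poz_X + int(i), poz_Y)
--                 premiki.append((poz_X, poz_Y))
--             elif smer % 360 == 180:
--                 poz_X, poz_Y = (poz_X, poz_Y + int(i))
--                 premiki.append((poz_X, poz_Y))
--             elif smer % 360 == 270:
--                 poz_X, poz_Y = (poz_X - int(i), poz_Y)
--                 premiki.append((poz_X, poz_Y))
--             elif smer % 360 == 0:
--                 poz_X, poz_Y = (poz_X, poz_Y - int(i))
--                 premiki.append((poz_X, poz_Y))
--     return premiki
-- ===== SOURCE B (Python) =====
-- def preberi_pot(ukazi):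
--     """
--     Za podani seznam ukazov (glej navodila naloge) vrni pot.
--
--     Args:
--         ukazi (str): ukazi, napisani po vrsticah
--
--     Returns:
--         list of tuple of int: pot
--     """
--     DIRS = [(0, -1), (1, 0), (0, 1), (-1, 0)]
--     # stage 1: annotate each numeric token with the quarter-turn count in effect
--     moves = []
--     h = 0
--     for t in ukazi.split():
--         if t == "DESNO":
--             h += 1
--         elif t == "LEVO":
--             h -= 1
--         elif t.isnumeric():
--             moves.append((h % 4, int(t)))
--     # stage 2: turn each move into a displacement vector by table lookup
--     deltas = [(n * DIRS[d][0], n * DIRS[d][1]) for d, n in moves]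
--     # stage 3: prefix-sum the displacements into absolute positions
--     pot = [(0, 0)]
--     for dx, dy in deltas:
--         pot.append((pot[-1][0] + dx, pot[-1][1] + dy))
--     return pot
-- ===== Notes on version B (the rewrite author's own statement) =====
-- stated objective: alternative
-- what changed: Replaces A's single imperative walk carrying (angle, position, path) with a three-stage pipeline: first reduce the tokens to a list of (heading mod 4, distance) moves, then map them through a direction table into displacement vectors, then prefix-sum the displacements into the path.
import Mathlib
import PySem

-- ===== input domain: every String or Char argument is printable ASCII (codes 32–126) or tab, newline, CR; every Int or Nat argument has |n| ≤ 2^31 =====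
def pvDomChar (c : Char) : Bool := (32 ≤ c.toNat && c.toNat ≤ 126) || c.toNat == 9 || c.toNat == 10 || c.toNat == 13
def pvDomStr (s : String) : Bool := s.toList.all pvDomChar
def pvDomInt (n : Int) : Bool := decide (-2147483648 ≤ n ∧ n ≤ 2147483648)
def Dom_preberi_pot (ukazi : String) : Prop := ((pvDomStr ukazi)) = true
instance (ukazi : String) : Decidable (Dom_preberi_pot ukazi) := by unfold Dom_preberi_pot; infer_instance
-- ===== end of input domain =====

-- B replaces A's single stateful walk by a three-stage pipeline (moves → displacement
-- vectors → prefix sums); same O(n) cost, a genuinely different decomposition.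

-- ===== PORT A =====
-- state: (smer, poz_X, poz_Y, premiki); i.isnumeric() on ASCII input = strIsdigit;
-- int(i) is exact via ofStr? (the guard guarantees it parses, so getD 0 is never used).
def pvStepA (st : Int × Int × Int × List (Int × Int)) (i : String) :
    Int × Int × Int × List (Int × Int) :=
  let (smer, x, y, prem) := st
  if i = "DESNO" then (smer + 90, x, y, prem)
  else if i = "LEVO" then (smer - 90, x, y, prem)
  else if PySem.Str.strIsdigit i then
    let n := (PySem.Int.ofStr? i).getD 0
    if PySem.Int.mod smer 360 = 90 then (smer, x + n, y, prem ++ [(x + n, y)])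
    else if PySem.Int.mod smer 360 = 180 then (smer, x, y + n, prem ++ [(x, y + n)])
    else if PySem.Int.mod smer 360 = 270 then (smer, x - n, y, prem ++ [(x - n, y)])
    else if PySem.Int.mod smer 360 = 0 then (smer, x, y - n, prem ++ [(x, y - n)])
    else st
  else st

def preberi_pot (ukazi : String) : List (Int × Int) :=
  ((PySem.Str.split₀ ukazi).foldl pvStepA (0, 0, 0, [(0, 0)])).2.2.2

-- ===== PORT B =====
-- DIRS table
def pvDirs : List (Int × Int) := [(0, -1), (1, 0), (0, 1), (-1, 0)]

-- stage 1: fold tokens to (h, moves); a numeric token records (h % 4, int(t))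
def pvStage1 (st : Int × List (Int × Int)) (t : String) : Int × List (Int × Int) :=
  let (h, moves) := st
  if t = "DESNO" then (h + 1, moves)
  else if t = "LEVO" then (h - 1, moves)
  else if PySem.Str.strIsdigit t then
    (h, moves ++ [(PySem.Int.mod h 4, (PySem.Int.ofStr? t).getD 0)])
  else st

-- stage 2: DIRS[d] lookup (d = h % 4 is always in range, so getD is never used)
def pvDelta (dn : Int × Int) : Int × Int :=
  let dir := (PySem.List.pyGet? pvDirs dn.1).getD (0, 0)
  (dn.2 * dir.1, dn.2 * dir.2)

-- stage 3: pot.append((pot[-1][0] + dx, pot[-1][1] + dy))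
def pvStage3 (pot : List (Int × Int)) (d : Int × Int) : List (Int × Int) :=
  let last := (PySem.List.pyGet? pot (-1)).getD (0, 0)
  pot ++ [(last.1 + d.1, last.2 + d.2)]

def preberi_pot_alt (ukazi : String) : List (Int × Int) :=
  let moves := ((PySem.Str.split₀ ukazi).foldl pvStage1 (0, [])).2
  let deltas := moves.map pvDelta
  deltas.foldl pvStage3 [(0, 0)]

-- ===== PRECONDITION & SPEC =====
def Spec_preberi_pot (ukazi : String) (out : List (Int × Int)) : Prop := out = preberi_pot_alt ukazi
instance (ukazi : String) (out : List (Int × Int)) : Decidable (Spec_preberi_pot ukazi out) := by unfold Spec_preberi_pot; infer_instance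

-- ===== CLAIM (what is proved, stated in full; the proofs are below) =====
def Claim_equal_preberi_pot : Prop := ∀ (ukazi : String), Dom_preberi_pot ukazi → Spec_preberi_pot ukazi (preberi_pot ukazi)

-- ===== LEMMAS AND PROOFS =====

-- stage-1 moves accumulate by appending: the moves list factors out of the fold
lemma pvStage1_append (ts : List String) (h : Int) (ms : List (Int × Int)) :
    (ts.foldl pvStage1 (h, ms)).1 = (ts.foldl pvStage1 (h, [])).1 ∧
    (ts.foldl pvStage1 (h, ms)).2 = ms ++ (ts.foldl pvStage1 (h, [])).2 := by
  induction ts generalizing h ms with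
  | nil => simp
  | cons t ts ih =>
    simp only [List.foldl_cons, pvStage1]
    split_ifs with h1 h2 h3
    · exact ih _ _
    · exact ih _ _
    · obtain ⟨e1, e2⟩ := ih h (ms ++ [(PySem.Int.mod h 4, (PySem.Int.ofStr? t).getD 0)])
      obtain ⟨f1, f2⟩ := ih h [(PySem.Int.mod h 4, (PySem.Int.ofStr? t).getD 0)]
      refine ⟨e1.trans f1.symm, ?_⟩
      rw [List.nil_append, e2, f2, List.append_assoc]
    · exact ih _ _

-- stage-3 step on a nonempty pot ending in (x, y)
lemma pvStage3_last (pot : List (Int × Int)) (x y : Int) (d : Int × Int) :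
    pvStage3 (pot ++ [(x, y)]) d = (pot ++ [(x, y)]) ++ [(x + d.1, y + d.2)] := by
  simp [pvStage3, PySem.List.pyGet?_neg_one_append_singleton]

-- the main loop correspondence: A's fold from angle 90*h, position (x,y), path acc
-- equals acc extended by B's stage-2/3 pipeline applied to the stage-1 moves
lemma pv_loop_eq (ts : List String) :
    ∀ (h x y : Int) (acc : List (Int × Int)),
      (ts.foldl pvStepA (90 * h, x, y, acc ++ [(x, y)])).2.2.2 =
      (((ts.foldl pvStage1 (h, [])).2.map pvDelta).foldl pvStage3 (acc ++ [(x, y)])) := by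
  induction ts with
  | nil => intro h x y acc; rfl
  | cons t ts ih =>
    intro h x y acc
    simp only [List.foldl_cons, pvStepA, pvStage1]
    by_cases hD : t = "DESNO"
    · simp only [hD, if_pos]
      have : (90 : Int) * h + 90 = 90 * (h + 1) := by ring
      rw [this]; exact ih (h + 1) x y acc
    · by_cases hL : t = "LEVO"
      · simp only [hL, if_pos]
        have : (90 : Int) * h - 90 = 90 * (h - 1) := by ring
        rw [this]; exact ih (h - 1) x y acc
      · by_cases hN : PySem.Str.strIsdigit t
        · simp only [if_neg hD, if_neg hL, if_pos hN]
          -- relate (90*h) % 360 to h % 4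
          have hm : PySem.Int.mod (90 * h) 360 = 90 * PySem.Int.mod h 4 := by
            simp only [PySem.Int.mod_eq_emod_of_pos (show (0:Int) < 360 by norm_num),
              PySem.Int.mod_eq_emod_of_pos (show (0:Int) < 4 by norm_num)]
            omega
          have h4 : PySem.Int.mod h 4 = 0 ∨ PySem.Int.mod h 4 = 1 ∨
              PySem.Int.mod h 4 = 2 ∨ PySem.Int.mod h 4 = 3 := by
            simp only [PySem.Int.mod_eq_emod_of_pos (show (0:Int) < 4 by norm_num)]
            omega
          set n := (PySem.Int.ofStr? t).getD 0 with hn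
          obtain ⟨m1, m2⟩ := pvStage1_append ts h [(PySem.Int.mod h 4, n)]
          rcases h4 with h4 | h4 | h4 | h4 <;>
            rw [h4] at m2 <;>
            rw [hm, h4] <;> norm_num <;>
            rw [m2] <;>
            simp only [List.singleton_append, List.map_cons, List.foldl_cons, pvDelta, pvDirs] <;>
            norm_num [PySem.List.pyGet?, PySem.List.pyIdx?] <;>
            rw [pvStage3_last]
          · have := ih h x (y - n) (acc ++ [(x, y)])
            rw [List.append_assoc] at this
            first
            | exact this
            | simpa using this
          · have := ih h (x + n) y (acc ++ [(x, y)])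
            rw [List.append_assoc] at this
            first
            | exact this
            | simpa using this
          · have := ih h x (y + n) (acc ++ [(x, y)])
            rw [List.append_assoc] at this
            first
            | exact this
            | simpa using this
          · have := ih h (x - n) y (acc ++ [(x, y)])
            rw [List.append_assoc] at this
            first
            | exact this
            | simpa using this
        · simp only [if_neg hD, if_neg hL, if_neg hN]
          exact ih h x y acc

-- ===== VERDICT (by name: the statement is the Claim_ definition above) =====
theorem preberi_pot_spec : Claim_equal_preberi_pot := by
  intro ukazi _
  show preberi_pot ukazi = preberi_pot_alt ukazi
  have := pv_loop_eq (PySem.Str.split₀ ukazi) 0 0 0 []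
  simpa [preberi_pot, preberi_pot_alt] using this
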